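-- pv_equiv track=rewrite | github.com/EKYoonD/gitCodes | lotto_20211018.py | solution
-- ===== SOURCE A (Python) =====
-- def solution(lotto_num, win_nums):
--     cnt = 0
--     max_cnt = 0
--     for i in lotto_num:
--         if i == 0:
--             max_cnt += 1
--         for j in win_nums:
--             if i == j:
--                 cnt += 1
--                 max_cnt += 1
--
--     if cnt == 0:
--         cnt = 1
--     if max_cnt == 0:
--         max_cnt = 1
--
--     answer = [7-max_cnt, 7-cnt]
--     return answer
-- ===== SOURCE B (Python) =====
-- def solution(lotto_num, win_nums):
--     wc = {}
--     for j in win_nums: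
--         wc[j] = wc.get(j, 0) + 1
--     cnt = sum(wc.get(i, 0) for i in lotto_num)
--     max_cnt = cnt + lotto_num.count(0)
--     return [7 - max(max_cnt, 1), 7 - max(cnt, 1)]
-- ===== Notes on version B (the rewrite author's own statement) =====
-- stated objective: faster
-- what changed: Replaces the fused nested loop (which tallies cnt and max_cnt together) with separate passes: a frequency dict over win_nums built once, a single multiplicity-preserving sum over lotto_num, a zero count, and max-clamps instead of the if-reassignments.
import Mathlib
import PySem

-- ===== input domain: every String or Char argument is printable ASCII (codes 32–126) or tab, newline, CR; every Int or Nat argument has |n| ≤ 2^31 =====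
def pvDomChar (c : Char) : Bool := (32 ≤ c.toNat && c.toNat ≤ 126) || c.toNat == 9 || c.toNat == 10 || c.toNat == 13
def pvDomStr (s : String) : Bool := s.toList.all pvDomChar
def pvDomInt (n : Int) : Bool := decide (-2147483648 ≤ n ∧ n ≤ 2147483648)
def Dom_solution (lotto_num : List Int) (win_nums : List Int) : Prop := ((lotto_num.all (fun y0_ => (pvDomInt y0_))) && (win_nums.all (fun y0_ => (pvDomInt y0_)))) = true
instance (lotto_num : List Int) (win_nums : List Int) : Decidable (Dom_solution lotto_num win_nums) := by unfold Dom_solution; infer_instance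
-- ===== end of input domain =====

-- B computes cnt via a frequency dict over win_nums plus one sum over lotto_num (instead of A's nested loop) and derives max_cnt as cnt + count of zeros; return value equivalence proved below.
-- ===== PORT A =====
def solution (lotto_num : List Int) (win_nums : List Int) : List Int :=
  let s := lotto_num.foldl (fun (s : Int × Int) i =>
    let s := if i = 0 then (s.1, s.2 + 1) else s
    win_nums.foldl (fun t j => if i = j then (t.1 + 1, t.2 + 1) else t) s) (0, 0)
  let cnt := if s.1 = 0 then (1 : Int) else s.1
  let max_cnt := if s.2 = 0 then (1 : Int) else s.2
  [7 - max_cnt, 7 - cnt]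

-- ===== PORT B =====
def solution_alt (lotto_num : List Int) (win_nums : List Int) : List Int :=
  let wc := win_nums.foldl (fun d j => d.insert j (d.getD j 0 + 1)) (PySem.Dict.empty : PySem.Dict Int Int)
  let cnt := (lotto_num.map (fun i => wc.getD i 0)).sum
  let max_cnt := cnt + (PySem.List.count lotto_num 0 : Int)
  [7 - max max_cnt 1, 7 - max cnt 1]

-- ===== PRECONDITION & SPEC =====
def Spec_solution (lotto_num : List Int) (win_nums : List Int) (out : List Int) : Prop := out = solution_alt lotto_num win_nums
instance (lotto_num : List Int) (win_nums : List Int) (out : List Int) : Decidable (Spec_solution lotto_num win_nums out) := by unfold Spec_solution; infer_instance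

-- ===== CLAIM (what is proved, stated in full; the proofs are below) =====
def Claim_equal_solution : Prop := ∀ (lotto_num : List Int) (win_nums : List Int), Dom_solution lotto_num win_nums → Spec_solution lotto_num win_nums (solution lotto_num win_nums)

-- ===== LEMMAS AND PROOFS =====

-- ===== VERDICT (by name: the statement is the Claim_ definition above) =====

lemma inner_lemma (i : Int) (win : List Int) (c m : Int) :
    win.foldl (fun t j => if i = j then (t.1 + 1, t.2 + 1) else t) (c, m)
      = (c + (win.count i : Int), m + (win.count i : Int)) := by
  induction win generalizing c m with
  | nil => simp
  | cons j t ih =>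
    simp only [List.foldl_cons, List.count_cons]
    by_cases h : i = j
    · subst h
      rw [if_pos rfl, ih, Prod.mk.injEq]
      simp only [beq_self_eq_true, if_true]
      constructor <;> push_cast <;> ring
    · have h2 : (j == i) = false := by simp; exact fun e => h e.symm
      rw [if_neg h, ih, h2]
      simp

lemma outer_lemma (lotto win : List Int) (c m : Int) :
    lotto.foldl (fun (s : Int × Int) i =>
      let s := if i = 0 then (s.1, s.2 + 1) else s
      win.foldl (fun t j => if i = j then (t.1 + 1, t.2 + 1) else t) s) (c, m)
      = (c + (lotto.map (fun i => (win.count i : Int))).sum,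
         m + (lotto.map (fun i => (win.count i : Int))).sum + (lotto.count 0 : Int)) := by
  induction lotto generalizing c m with
  | nil => simp
  | cons i t ih =>
    simp only [List.foldl_cons, List.map_cons, List.sum_cons, List.count_cons]
    by_cases h : i = 0
    · subst h
      simp only [inner_lemma, ih, Prod.mk.injEq, beq_self_eq_true, if_true]
      constructor <;> push_cast <;> ring
    · have h2 : (i == 0) = false := by simp [h]
      simp only [if_neg h, inner_lemma, ih, Prod.mk.injEq, h2]
      constructor <;> push_cast <;> ring

lemma sum_nonneg_counts (lotto win : List Int) :
    0 ≤ (lotto.map (fun i => (win.count i : Int))).sum := by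
  apply List.sum_nonneg
  intro x hx
  simp only [List.mem_map] at hx
  obtain ⟨i, _, rfl⟩ := hx
  positivity

theorem solution_spec : Claim_equal_solution := by
  intro lotto win _
  unfold Spec_solution solution solution_alt
  rw [outer_lemma]
  have hwc : ∀ i : Int,
      (win.foldl (fun d j => d.insert j (d.getD j 0 + 1)) (PySem.Dict.empty : PySem.Dict Int Int)).getD i 0
        = (win.count i : Int) := by
    intro i
    rw [PySem.Dict.getD_foldl_insert_add_one]
    simp [PySem.Dict.getD]
  simp only [hwc]
  rw [PySem.List.count_eq]
  set S := (lotto.map (fun i => (win.count i : Int))).sum with hS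
  have hSnn : 0 ≤ S := sum_nonneg_counts lotto win
  have hZnn : (0 : Int) ≤ (lotto.count 0 : Int) := by positivity
  simp only [zero_add]
  congr 1
  · by_cases h : S + (lotto.count 0 : Int) = 0
    · rw [if_pos h, h]; omega
    · rw [if_neg h]; omega
  · congr 1
    by_cases h : S = 0
    · rw [if_pos h, h]; omega
    · rw [if_neg h]; omega
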